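-- pv_equiv track=rewrite | github.com/RToavina/Aide_NSI | Codes/jeux_de_cartes.py | JouerUneCarte
-- ===== SOURCE A (Python) =====
-- def JouerUneCarte(ListeCartes1, ListeCartes2):
--     """
--
--     Fonction qui choisi la carte qu'il faut jouer en fonction de la main du joueur 1 et du joueur 2.
--     L'objectif est de battre le robot à tous les coups en sachant que la partie se joue en 1000 donnes.
--     On peut même aller plus loin car on connait le jeu de l'adversaire on peut choisir
--     la carte à jouer en fonction du jeu de l'adversaire.
--
--     params:
--     ListeCartes1 : liste de vos cartes de la forme [couleur, valeur]
--     ListeCartes2 : liste des cartes de l'adversaire de la forme [couleur, valeur]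
--
--     """
--
--     liste1 = [i[1] for i in ListeCartes1 if i[0]==1]
--     liste2 = [i[1] for i in ListeCartes1 if i[0]==0]
--
--     # On joue la carte la plus forte possible pour battre l'adversaire
--     for i in range(len(ListeCartes1)) :
--         if ListeCartes1[i][0] == 2 :
--             carte = ListeCartes1[i]
--             return carte
--
--     # On joue la carte verte la plus forte possible
--     for i in range(len(ListeCartes1)) :
--         if ListeCartes1[i][0] == 1 and ListeCartes1[i][1] == max(liste1) :
--             carte = ListeCartes1[i]
--             return carte
--
--     # On joue la carte violette la plus faible possible
--     for i in range(len(ListeCartes1)) :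
--         if ListeCartes1[i][0] == 0 and ListeCartes1[i][1] == min(liste2) :
--             carte = ListeCartes1[i]
--             return carte
--
--     # Si aucune carte ne peut être jouée pour battre l'adversaire, on joue la première carte
--     carte = ListeCartes1[0]
--     return carte
-- ===== SOURCE B (Python) =====
-- def JouerUneCarte(ListeCartes1, ListeCartes2):
--     first2 = None   # first red (color 2) card
--     best_g = None   # green (color 1) card with maximal value, first occurrence wins
--     best_v = None   # violet (color 0) card with minimal value, first occurrence wins
--     for carte in ListeCartes1:
--         c = carte[0]
--         if c == 2:
--             if first2 is None:
--                 first2 = carte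
--         elif c == 1:
--             if best_g is None or carte[1] > best_g[1]:
--                 best_g = carte
--         elif c == 0:
--             if best_v is None or carte[1] < best_v[1]:
--                 best_v = carte
--     if first2 is not None:
--         return first2
--     if best_g is not None:
--         return best_g
--     if best_v is not None:
--         return best_v
--     return ListeCartes1[0]
-- ===== Notes on version B (the rewrite author's own statement) =====
-- stated objective: alternative
-- what changed: Replaces the two list comprehensions plus three separate first-match scans with max()/min() recomputation inside the loop condition by a single pass that maintains three running candidates (first red card, first maximal green, first minimal violet) and picks by the same priority afterwards.
import Mathlib
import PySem

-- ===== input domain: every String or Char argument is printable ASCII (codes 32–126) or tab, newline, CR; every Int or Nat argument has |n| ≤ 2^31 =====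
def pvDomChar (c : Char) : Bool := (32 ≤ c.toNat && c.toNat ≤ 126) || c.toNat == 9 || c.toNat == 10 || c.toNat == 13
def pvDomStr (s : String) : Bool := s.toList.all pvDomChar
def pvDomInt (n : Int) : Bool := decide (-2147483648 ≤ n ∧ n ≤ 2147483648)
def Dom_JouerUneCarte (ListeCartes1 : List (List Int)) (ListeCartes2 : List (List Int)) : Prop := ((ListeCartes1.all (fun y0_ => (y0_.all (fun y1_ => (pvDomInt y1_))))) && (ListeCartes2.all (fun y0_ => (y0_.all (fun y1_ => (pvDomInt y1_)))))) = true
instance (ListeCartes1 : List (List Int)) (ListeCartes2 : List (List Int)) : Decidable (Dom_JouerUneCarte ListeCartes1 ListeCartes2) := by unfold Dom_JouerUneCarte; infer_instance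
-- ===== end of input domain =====

-- B replaces A's comprehensions + three first-match scans with in-loop max()/min() recomputation
-- by a single pass keeping three running candidate cards (alternative decomposition, same result).

-- card[0] / card[1]; inside Pre_ the index is always in range, so the default is never used
def pvCard0 (c : List Int) : Int := PySem.List.pyGetD c 0 0
def pvCard1 (c : List Int) : Int := PySem.List.pyGetD c 1 0

-- ===== PORT A =====
-- each 'for i in range(len(...)): if …: return' loop is the first-match scan List.find?;
-- the comprehensions liste1/liste2 are written inline at their single use site
def JouerUneCarte (ListeCartes1 : List (List Int)) (ListeCartes2 : List (List Int)) : List Int :=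
  match ListeCartes1.find? (fun c => pvCard0 c == 2) with
  | some carte => carte
  | none =>
    match ListeCartes1.find? (fun c => pvCard0 c == 1 &&
        pvCard1 c == (PySem.List.max? ((ListeCartes1.filter (fun i => pvCard0 i == 1)).map (fun i => pvCard1 i)) (fun y => y)).getD 0) with
    | some carte => carte
    | none =>
      match ListeCartes1.find? (fun c => pvCard0 c == 0 &&
          pvCard1 c == (PySem.List.min? ((ListeCartes1.filter (fun i => pvCard0 i == 0)).map (fun i => pvCard1 i)) (fun y => y)).getD 0) with
      | some carte => carte
      | none => ListeCartes1.headI   -- ListeCartes1[0]; nonempty inside Pre_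

-- ===== PORT B =====
-- one fold over ListeCartes1 maintaining (first red card, best green card, best violet card)
def pvStep (st : Option (List Int) × Option (List Int) × Option (List Int)) (carte : List Int) :
    Option (List Int) × Option (List Int) × Option (List Int) :=
  let c := pvCard0 carte
  if c == 2 then
    if st.1.isNone then (some carte, st.2.1, st.2.2) else st
  else if c == 1 then
    match st.2.1 with
    | none => (st.1, some carte, st.2.2)
    | some g => if pvCard1 g < pvCard1 carte then (st.1, some carte, st.2.2) else st
  else if c == 0 then
    match st.2.2 with
    | none => (st.1, st.2.1, some carte)
    | some v => if pvCard1 carte < pvCard1 v then (st.1, st.2.1, some carte) else st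
  else st

def JouerUneCarte_alt (ListeCartes1 : List (List Int)) (ListeCartes2 : List (List Int)) : List Int :=
  match ListeCartes1.foldl pvStep (none, none, none) with
  | (some c, _, _) => c
  | (none, some c, _) => c
  | (none, none, some c) => c
  | (none, none, none) => ListeCartes1.headI

-- ===== PRECONDITION & SPEC =====
-- Pre_ excludes exactly the inputs where Python A raises: an empty hand (IndexError on
-- ListeCartes1[0]) or a card that is empty, or has colour 0/1 but no value (IndexError on i[0]/i[1]).
def Pre_JouerUneCarte (ListeCartes1 : List (List Int)) (ListeCartes2 : List (List Int)) : Prop :=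
  ListeCartes1 ≠ [] ∧ ∀ c ∈ ListeCartes1, 1 ≤ c.length ∧ ((c.headI = 0 ∨ c.headI = 1) → 2 ≤ c.length)
instance (ListeCartes1 : List (List Int)) (ListeCartes2 : List (List Int)) : Decidable (Pre_JouerUneCarte ListeCartes1 ListeCartes2) := by unfold Pre_JouerUneCarte; infer_instance
def pvWitness_JouerUneCarte : List (List Int) × List (List Int) := ([[1, 3], [0, 2], [2, 5]], [[1, 1]])

def Spec_JouerUneCarte (ListeCartes1 : List (List Int)) (ListeCartes2 : List (List Int)) (out : List Int) : Prop := out = JouerUneCarte_alt ListeCartes1 ListeCartes2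
instance (ListeCartes1 : List (List Int)) (ListeCartes2 : List (List Int)) (out : List Int) : Decidable (Spec_JouerUneCarte ListeCartes1 ListeCartes2 out) := by unfold Spec_JouerUneCarte; infer_instance

-- ===== CLAIM (what is proved, stated in full; the proofs are below) =====
def Claim_equal_JouerUneCarte : Prop := ∀ (ListeCartes1 : List (List Int)) (ListeCartes2 : List (List Int)), Dom_JouerUneCarte ListeCartes1 ListeCartes2 → Pre_JouerUneCarte ListeCartes1 ListeCartes2 → Spec_JouerUneCarte ListeCartes1 ListeCartes2 (JouerUneCarte ListeCartes1 ListeCartes2)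

-- ===== LEMMAS AND PROOFS =====

-- the three components of pvStep, taken separately
def pvStep2 (o : Option (List Int)) (c : List Int) : Option (List Int) :=
  if pvCard0 c == 2 then (if o.isNone then some c else o) else o
def pvStepG (o : Option (List Int)) (c : List Int) : Option (List Int) :=
  if pvCard0 c == 1 then
    (match o with
     | none => some c
     | some g => if pvCard1 g < pvCard1 c then some c else o)
  else o
def pvStepV (o : Option (List Int)) (c : List Int) : Option (List Int) :=
  if pvCard0 c == 0 then
    (match o with
     | none => some c
     | some v => if pvCard1 c < pvCard1 v then some c else o)
  else o

theorem pvStep_eq (st : Option (List Int) × Option (List Int) × Option (List Int)) (c : List Int) :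
    pvStep st c = (pvStep2 st.1 c, pvStepG st.2.1 c, pvStepV st.2.2 c) := by
  obtain ⟨a, b, v⟩ := st
  cases a <;> cases b <;> cases v <;>
    simp only [pvStep, pvStep2, pvStepG, pvStepV] <;>
    split_ifs <;> simp_all

theorem foldl_pvStep (L : List (List Int)) :
    ∀ st : Option (List Int) × Option (List Int) × Option (List Int),
    L.foldl pvStep st = (L.foldl pvStep2 st.1, L.foldl pvStepG st.2.1, L.foldl pvStepV st.2.2) := by
  induction L with
  | nil => intro st; rfl
  | cons c t ih =>
    intro st
    simp only [List.foldl_cons, pvStep_eq, ih]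

theorem foldl_pvStep2_some (L : List (List Int)) (a : List Int) :
    L.foldl pvStep2 (some a) = some a := by
  induction L with
  | nil => rfl
  | cons c t ih => simp only [List.foldl_cons, pvStep2]; split <;> simp [ih]

theorem foldl_pvStep2_none (L : List (List Int)) :
    L.foldl pvStep2 none = L.find? (fun c => pvCard0 c == 2) := by
  induction L with
  | nil => rfl
  | cons c t ih =>
    cases h : (pvCard0 c == 2) with
    | true =>
      simp only [List.foldl_cons, List.find?_cons, pvStep2, h, if_pos]
      exact foldl_pvStep2_some t c
    | false =>
      simp only [List.foldl_cons, List.find?_cons, pvStep2, h, Bool.false_eq_true, if_false]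
      exact ih

-- best-green recursion: the value of the green fold started at 'some g'
def pvBestG (g : List Int) : List (List Int) → List Int
  | [] => g
  | c :: t => if pvCard1 g < pvCard1 c then pvBestG c t else pvBestG g t

def pvStepG' (o : Option (List Int)) (c : List Int) : Option (List Int) :=
  match o with
  | none => some c
  | some g => if pvCard1 g < pvCard1 c then some c else o

theorem foldl_pvStepG'_some (gs : List (List Int)) : ∀ g,
    gs.foldl pvStepG' (some g) = some (pvBestG g gs) := by
  induction gs with
  | nil => intro g; rfl
  | cons c t ih =>
    intro g
    simp only [List.foldl_cons, pvStepG', pvBestG]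
    split <;> simp [ih]

theorem find?_max_eq_bestG (gs : List (List Int)) : ∀ g : List Int,
    (g :: gs).find? (fun c => pvCard1 c == (gs.map pvCard1).foldl max (pvCard1 g)) =
      some (pvBestG g gs) := by
  induction gs with
  | nil => intro g; simp [pvBestG]
  | cons c t ih =>
    intro g
    simp only [List.map_cons, List.foldl_cons]
    by_cases h : pvCard1 g < pvCard1 c
    · have hM : max (pvCard1 g) (pvCard1 c) = pvCard1 c := by omega
      rw [hM, pvBestG, if_pos h]
      have hc := (PySem.List.le_foldl_max (t.map pvCard1) (pvCard1 c)).1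
      have hgF : (pvCard1 g == (t.map pvCard1).foldl max (pvCard1 c)) = false :=
        beq_eq_false_iff_ne.mpr (by omega)
      simp only [List.find?_cons, hgF]
      exact ih c
    · have hM : max (pvCard1 g) (pvCard1 c) = pvCard1 g := by omega
      rw [hM, pvBestG, if_neg h]
      have hg0 := (PySem.List.le_foldl_max (t.map pvCard1) (pvCard1 g)).1
      have := ih g
      by_cases hg : pvCard1 g = (t.map pvCard1).foldl max (pvCard1 g)
      · have hgT : (pvCard1 g == (t.map pvCard1).foldl max (pvCard1 g)) = true :=
          beq_iff_eq.mpr hg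
        simp only [List.find?_cons, hgT] at this ⊢
        exact this
      · have hgF : (pvCard1 g == (t.map pvCard1).foldl max (pvCard1 g)) = false :=
          beq_eq_false_iff_ne.mpr hg
        have hcF : (pvCard1 c == (t.map pvCard1).foldl max (pvCard1 g)) = false :=
          beq_eq_false_iff_ne.mpr (by omega)
        simp only [List.find?_cons, hgF, hcF] at this ⊢
        exact this

-- best-violet recursion (mirror, with min)
def pvBestV (v : List Int) : List (List Int) → List Int
  | [] => v
  | c :: t => if pvCard1 c < pvCard1 v then pvBestV c t else pvBestV v t

def pvStepV' (o : Option (List Int)) (c : List Int) : Option (List Int) :=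
  match o with
  | none => some c
  | some v => if pvCard1 c < pvCard1 v then some c else o

theorem foldl_pvStepV'_some (vs : List (List Int)) : ∀ v,
    vs.foldl pvStepV' (some v) = some (pvBestV v vs) := by
  induction vs with
  | nil => intro v; rfl
  | cons c t ih =>
    intro v
    simp only [List.foldl_cons, pvStepV', pvBestV]
    split <;> simp [ih]

theorem find?_min_eq_bestV (vs : List (List Int)) : ∀ v : List Int,
    (v :: vs).find? (fun c => pvCard1 c == (vs.map pvCard1).foldl min (pvCard1 v)) =
      some (pvBestV v vs) := by
  induction vs with
  | nil => intro v; simp [pvBestV]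
  | cons c t ih =>
    intro v
    simp only [List.map_cons, List.foldl_cons]
    by_cases h : pvCard1 c < pvCard1 v
    · have hM : min (pvCard1 v) (pvCard1 c) = pvCard1 c := by omega
      rw [hM, pvBestV, if_pos h]
      have hc := (PySem.List.foldl_min_le (t.map pvCard1) (pvCard1 c)).1
      have hvF : (pvCard1 v == (t.map pvCard1).foldl min (pvCard1 c)) = false :=
        beq_eq_false_iff_ne.mpr (by omega)
      simp only [List.find?_cons, hvF]
      exact ih c
    · have hM : min (pvCard1 v) (pvCard1 c) = pvCard1 v := by omega
      rw [hM, pvBestV, if_neg h]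
      have hv0 := (PySem.List.foldl_min_le (t.map pvCard1) (pvCard1 v)).1
      have := ih v
      by_cases hv : pvCard1 v = (t.map pvCard1).foldl min (pvCard1 v)
      · have hvT : (pvCard1 v == (t.map pvCard1).foldl min (pvCard1 v)) = true :=
          beq_iff_eq.mpr hv
        simp only [List.find?_cons, hvT] at this ⊢
        exact this
      · have hvF : (pvCard1 v == (t.map pvCard1).foldl min (pvCard1 v)) = false :=
          beq_eq_false_iff_ne.mpr hv
        have hcF : (pvCard1 c == (t.map pvCard1).foldl min (pvCard1 v)) = false :=
          beq_eq_false_iff_ne.mpr (by omega)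
        simp only [List.find?_cons, hvF, hcF] at this ⊢
        exact this

-- find? of 'p && q' over L = find? of q over filter p
theorem find?_and_filter (L : List (List Int)) (p q : List Int → Bool) :
    L.find? (fun c => p c && q c) = (L.filter p).find? q := by
  induction L with
  | nil => rfl
  | cons c t ih =>
    cases hp : p c with
    | true =>
      cases hq : q c with
      | true => simp only [List.find?_cons, List.filter_cons, hp, hq, if_pos, Bool.true_and]
      | false =>
        simp only [List.find?_cons, List.filter_cons, hp, hq, if_pos, Bool.true_and]
        exact ih
    | false =>
      simp only [List.find?_cons, List.filter_cons, hp, Bool.false_and,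
        Bool.false_eq_true, if_false]
      exact ih

-- the green/violet folds over the whole list equal the filtered primed folds
theorem foldl_pvStepG_eq (L : List (List Int)) :
    L.foldl pvStepG none = (L.filter (fun c => pvCard0 c == 1)).foldl pvStepG' none := by
  rw [← PySem.List.foldl_if_eq_foldl_filter (fun c => pvCard0 c == 1) pvStepG']
  rfl

theorem foldl_pvStepV_eq (L : List (List Int)) :
    L.foldl pvStepV none = (L.filter (fun c => pvCard0 c == 0)).foldl pvStepV' none := by
  rw [← PySem.List.foldl_if_eq_foldl_filter (fun c => pvCard0 c == 0) pvStepV']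
  rfl

-- A's green scan (loop 2) = B's green component, and the violet mirror
theorem green_eq (L : List (List Int)) :
    L.find? (fun c => pvCard0 c == 1 &&
        pvCard1 c == (PySem.List.max? ((L.filter (fun i => pvCard0 i == 1)).map (fun i => pvCard1 i)) (fun y => y)).getD 0) =
      L.foldl pvStepG none := by
  rw [find?_and_filter, foldl_pvStepG_eq]
  cases hg : L.filter (fun c => pvCard0 c == 1) with
  | nil => simp
  | cons g gs =>
    simp only [List.map_cons, PySem.List.max?_id_cons, Option.getD_some, List.foldl_cons]
    rw [show pvStepG' none g = some g from rfl, foldl_pvStepG'_some]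
    have := find?_max_eq_bestG gs g
    exact this

theorem violet_eq (L : List (List Int)) :
    L.find? (fun c => pvCard0 c == 0 &&
        pvCard1 c == (PySem.List.min? ((L.filter (fun i => pvCard0 i == 0)).map (fun i => pvCard1 i)) (fun y => y)).getD 0) =
      L.foldl pvStepV none := by
  rw [find?_and_filter, foldl_pvStepV_eq]
  cases hv : L.filter (fun c => pvCard0 c == 0) with
  | nil => simp
  | cons v vs =>
    simp only [List.map_cons, PySem.List.min?_id_cons, Option.getD_some, List.foldl_cons]
    rw [show pvStepV' none v = some v from rfl, foldl_pvStepV'_some]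
    have := find?_min_eq_bestV vs v
    exact this

-- ===== VERDICT (by name: the statement is the Claim_ definition above) =====
theorem JouerUneCarte_spec : Claim_equal_JouerUneCarte := by
  intro L1 L2 _ _
  unfold Spec_JouerUneCarte JouerUneCarte JouerUneCarte_alt
  rw [foldl_pvStep, foldl_pvStep2_none, ← green_eq, ← violet_eq]
  cases L1.find? (fun c => pvCard0 c == 2) with
  | some c => rfl
  | none =>
    cases L1.find? (fun c => pvCard0 c == 1 &&
        pvCard1 c == (PySem.List.max? ((L1.filter (fun i => pvCard0 i == 1)).map (fun i => pvCard1 i)) (fun y => y)).getD 0) with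
    | some c => rfl
    | none =>
      cases L1.find? (fun c => pvCard0 c == 0 &&
          pvCard1 c == (PySem.List.min? ((L1.filter (fun i => pvCard0 i == 0)).map (fun i => pvCard1 i)) (fun y => y)).getD 0) with
      | some c => rfl
      | none => rfl
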